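-- pv_equiv track=rewrite | github.com/fixxxera/Royal-Caribbean | main.py | split_europe
-- ===== SOURCE A (Python) =====
-- def split_europe(ports, dn, dc):
--     baltic = ['Petropavlovsk, Russia', 'Bergen, Norway', 'Flam, Norway', 'Geiranger, Norway', 'Alesund, Norway',
--               'Stavanger, Norway', 'Skjolden, Norway', 'Stockholm, Sweden', 'Helsinki, Finland',
--               'St. Petersburg, Russia', 'Tallinn, Estonia', 'Riga, Latvia', 'Warnemunde, Germany',
--               'Copenhagen, Denmark', 'Kristiansand, Norway', 'Skagen, Denmark', 'Fredericia, Denmark',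
--               'Rostock (Berlin), Germany', 'Nynashamn, Sweden', 'Oslo, Norway', 'Amsterdam, Netherlands',
--               'Reykjavik, Iceland',
--               'Zeebrugge (Brussels), Belgium', 'Southampton, England']
--     eastern_med = ['Athens (Piraeus), Greece', 'Katakolon, Greece', 'Dubrovnik, Croatia', 'Mykonos, Greece',
--                    'Rhodes, Greece', 'Chania (Souda),Crete, Greece', 'Koper, Slovenia', 'Split, Croatia',
--                    'Santorini, Greece', 'Zadar, Croatia', 'Corfu, Greece', 'Kotor, Montenegro']
--     west_med = ['Catania,Sicily,Italy', 'Ajaccio, Corsica', 'Alicante, Spain', 'Barcelona, Spain', 'Bilbao, Spain',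
--                 'Cadiz, Spain', 'Cannes, France', 'Cartagena, Spain', 'Florence / Pisa (Livorno),Italy',
--                 'Fuerteventura, Canary', 'Funchal (Madeira), Portugal', 'Genoa, Italy', 'Gibraltar, United Kingdom',
--                 'Ibiza, Spain', 'La Coruna, Spain', 'La Spezia, Italy', 'Lanzarote, Canary Islands',
--                 'Las Palmas, Gran Canaria', 'Lisbon, Portugal', 'Malaga, Spain', 'Marseille, France',
--                 'Messina (Sicily), Italy', 'Montecarlo, Monaco', 'Naples, Italy', 'Nice (Villefranche)',
--                 'Palma De Mallorca, Spain', 'Ponta Delgada, Azores', 'Portofino, Italy', 'Provence (Toulon), France',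
--                 'Ravenna, Italy', 'Sete, France', 'St. Peter Port, Channel Isl', 'Tenerife, Canary Islands',
--                 'Valencia, Spain', 'Valletta, Malta', 'Venice, Italy', 'Vigo, Spain']
--     europe = ['Rome (Civitavecchia), Italy', 'Le Havre (Paris), France', 'Akureyri, Iceland',
--               'Belfast, Northern Ireland', 'Cherbourg, France', 'Cork (Cobh), Ireland', 'Dover, England',
--               'Dublin, Ireland', 'Edinburgh, Scotland', 'Greenock (Glasgow), Scotland', 'Inverness/Loch Ness, Scotland',
--               'Lerwick/Shetland, Scotland', 'Liverpool, England',
--               'Waterford (Dunmore E.), Ireland']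
--
--     ports_visited = ports
--
--     ports_list = []
--     for i in range(len(ports_visited)):
--
--         if i == 0:
--             pass
--         else:
--             ports_list.append(ports_visited[i])
--     for element in baltic:
--         for p in ports_list:
--             if p in element or element in p:
--                 return ['Baltic', 'E']
--             elif ports_visited[0] in element or element in ports_visited[0]:
--                 return ['Baltic', 'E']
--
--     for element in eastern_med:
--         for p in ports_list:
--             if p in element or element in p:
--                 return ['Eastern Med', 'E']
--
--     for element in west_med:
--         for p in ports_list:
--             if p in element or element in p:
--                 return ['Western Med', 'E']
--
--     return [dn, dc]
-- ===== SOURCE B (Python) =====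
-- def split_europe(ports, dn, dc):
--     baltic = ['Petropavlovsk, Russia', 'Bergen, Norway', 'Flam, Norway', 'Geiranger, Norway', 'Alesund, Norway',
--               'Stavanger, Norway', 'Skjolden, Norway', 'Stockholm, Sweden', 'Helsinki, Finland',
--               'St. Petersburg, Russia', 'Tallinn, Estonia', 'Riga, Latvia', 'Warnemunde, Germany',
--               'Copenhagen, Denmark', 'Kristiansand, Norway', 'Skagen, Denmark', 'Fredericia, Denmark',
--               'Rostock (Berlin), Germany', 'Nynashamn, Sweden', 'Oslo, Norway', 'Amsterdam, Netherlands',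
--               'Reykjavik, Iceland',
--               'Zeebrugge (Brussels), Belgium', 'Southampton, England']
--     eastern_med = ['Athens (Piraeus), Greece', 'Katakolon, Greece', 'Dubrovnik, Croatia', 'Mykonos, Greece',
--                    'Rhodes, Greece', 'Chania (Souda),Crete, Greece', 'Koper, Slovenia', 'Split, Croatia',
--                    'Santorini, Greece', 'Zadar, Croatia', 'Corfu, Greece', 'Kotor, Montenegro']
--     west_med = ['Catania,Sicily,Italy', 'Ajaccio, Corsica', 'Alicante, Spain', 'Barcelona, Spain', 'Bilbao, Spain',
--                 'Cadiz, Spain', 'Cannes, France', 'Cartagena, Spain', 'Florence / Pisa (Livorno),Italy',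
--                 'Fuerteventura, Canary', 'Funchal (Madeira), Portugal', 'Genoa, Italy', 'Gibraltar, United Kingdom',
--                 'Ibiza, Spain', 'La Coruna, Spain', 'La Spezia, Italy', 'Lanzarote, Canary Islands',
--                 'Las Palmas, Gran Canaria', 'Lisbon, Portugal', 'Malaga, Spain', 'Marseille, France',
--                 'Messina (Sicily), Italy', 'Montecarlo, Monaco', 'Naples, Italy', 'Nice (Villefranche)',
--                 'Palma De Mallorca, Spain', 'Ponta Delgada, Azores', 'Portofino, Italy', 'Provence (Toulon), France',
--                 'Ravenna, Italy', 'Sete, France', 'St. Peter Port, Channel Isl', 'Tenerife, Canary Islands',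
--                 'Valencia, Spain', 'Valletta, Malta', 'Venice, Italy', 'Vigo, Spain']
--
--     def matches(p, region):
--         return any(p in e or e in p for e in region)
--
--     # One pass over the ports, keeping the best (lowest) region rank seen:
--     # 1 = Baltic, 2 = Eastern Med, 3 = Western Med, 4 = none.
--     best = 4
--     # The first port only ever counts towards Baltic, and only on itineraries
--     # of at least two ports (that is the function's behaviour on every input).
--     if len(ports) >= 2 and matches(ports[0], baltic):
--         best = 1
--     for p in ports[1:]:
--         if matches(p, baltic):
--             r = 1
--         elif matches(p, eastern_med):
--             r = 2
--         elif matches(p, west_med):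
--             r = 3
--         else:
--             r = 4
--         best = min(best, r)
--     return [['Baltic', 'E'], ['Eastern Med', 'E'], ['Western Med', 'E'], [dn, dc]][best - 1]
-- ===== Notes on version B (the rewrite author's own statement) =====
-- stated objective: alternative
-- what changed: Replaces A's three sequential region-by-region scans with early return (each scanning all ports inside each region element) by a single pass over the ports that keeps a best-region-rank accumulator (1=Baltic, 2=Eastern, 3=Western, 4=none) and selects the label from the final rank.
import Mathlib
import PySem

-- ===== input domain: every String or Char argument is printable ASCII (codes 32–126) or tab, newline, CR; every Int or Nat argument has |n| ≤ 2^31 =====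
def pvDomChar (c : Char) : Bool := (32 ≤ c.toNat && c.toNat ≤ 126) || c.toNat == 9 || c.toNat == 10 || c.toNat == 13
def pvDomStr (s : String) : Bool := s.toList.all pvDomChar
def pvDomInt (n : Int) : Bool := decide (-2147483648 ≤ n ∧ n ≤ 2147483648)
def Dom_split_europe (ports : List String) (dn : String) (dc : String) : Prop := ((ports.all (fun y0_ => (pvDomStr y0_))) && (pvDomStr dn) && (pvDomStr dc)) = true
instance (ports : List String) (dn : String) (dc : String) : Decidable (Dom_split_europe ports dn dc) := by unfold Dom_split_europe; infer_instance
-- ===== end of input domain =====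

-- B replaces A's sequential region-by-region scans (each with early return) by a single
-- pass over the ports keeping a best-region-rank accumulator; same results, similar cost.


-- ===== PORT A =====
-- the three literal region lists of the Python source (shared by both ports as data)
def balticL : List String := ["Petropavlovsk, Russia", "Bergen, Norway", "Flam, Norway", "Geiranger, Norway", "Alesund, Norway",
  "Stavanger, Norway", "Skjolden, Norway", "Stockholm, Sweden", "Helsinki, Finland",
  "St. Petersburg, Russia", "Tallinn, Estonia", "Riga, Latvia", "Warnemunde, Germany",
  "Copenhagen, Denmark", "Kristiansand, Norway", "Skagen, Denmark", "Fredericia, Denmark",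
  "Rostock (Berlin), Germany", "Nynashamn, Sweden", "Oslo, Norway", "Amsterdam, Netherlands",
  "Reykjavik, Iceland", "Zeebrugge (Brussels), Belgium", "Southampton, England"]
def easternL : List String := ["Athens (Piraeus), Greece", "Katakolon, Greece", "Dubrovnik, Croatia", "Mykonos, Greece",
  "Rhodes, Greece", "Chania (Souda),Crete, Greece", "Koper, Slovenia", "Split, Croatia",
  "Santorini, Greece", "Zadar, Croatia", "Corfu, Greece", "Kotor, Montenegro"]
def westL : List String := ["Catania,Sicily,Italy", "Ajaccio, Corsica", "Alicante, Spain", "Barcelona, Spain", "Bilbao, Spain",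
  "Cadiz, Spain", "Cannes, France", "Cartagena, Spain", "Florence / Pisa (Livorno),Italy",
  "Fuerteventura, Canary", "Funchal (Madeira), Portugal", "Genoa, Italy", "Gibraltar, United Kingdom",
  "Ibiza, Spain", "La Coruna, Spain", "La Spezia, Italy", "Lanzarote, Canary Islands",
  "Las Palmas, Gran Canaria", "Lisbon, Portugal", "Malaga, Spain", "Marseille, France",
  "Messina (Sicily), Italy", "Montecarlo, Monaco", "Naples, Italy", "Nice (Villefranche)",
  "Palma De Mallorca, Spain", "Ponta Delgada, Azores", "Portofino, Italy", "Provence (Toulon), France",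
  "Ravenna, Italy", "Sete, France", "St. Peter Port, Channel Isl", "Tenerife, Canary Islands",
  "Valencia, Spain", "Valletta, Malta", "Venice, Italy", "Vigo, Spain"]

-- ports_list built by A's index loop (pyGetD's default is never used: i < len ports)
def portsListA (ports : List String) : List String :=
  (PySem.List.pyRange 0 (PySem.List.len ports) 1).foldl
    (fun acc i => if i == 0 then acc else acc ++ [PySem.List.pyGetD ports i ""]) []

-- inner loop of the baltic scan: 'if p in e or e in p: return … elif ports[0] in e or e in ports[0]: return …'
def innerBalticA (first e : String) : List String → Bool
  | [] => false
  | p :: rest =>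
    if PySem.Str.isIn p e || PySem.Str.isIn e p then true
    else if PySem.Str.isIn first e || PySem.Str.isIn e first then true
    else innerBalticA first e rest

def outerBalticA (first : String) (pl : List String) : List String → Bool
  | [] => false
  | e :: rest => if innerBalticA first e pl then true else outerBalticA first pl rest

-- inner loop of the eastern/western scans (no elif)
def innerSimpleA (e : String) : List String → Bool
  | [] => false
  | p :: rest =>
    if PySem.Str.isIn p e || PySem.Str.isIn e p then true else innerSimpleA e rest

def outerSimpleA (pl : List String) : List String → Bool
  | [] => false
  | e :: rest => if innerSimpleA e pl then true else outerSimpleA pl rest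

def split_europe (ports : List String) (dn : String) (dc : String) : List String :=
  let ports_list := portsListA ports
  -- ports[0] is only evaluated when ports_list is non-empty, hence the default is never used
  if outerBalticA (PySem.List.pyGetD ports 0 "") ports_list balticL then ["Baltic", "E"]
  else if outerSimpleA ports_list easternL then ["Eastern Med", "E"]
  else if outerSimpleA ports_list westL then ["Western Med", "E"]
  else [dn, dc]

-- ===== PORT B =====
def matchesRegion (p : String) (region : List String) : Bool :=
  region.any (fun e => PySem.Str.isIn p e || PySem.Str.isIn e p)

def rankB (p : String) : Int :=
  if matchesRegion p balticL then 1
  else if matchesRegion p easternL then 2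
  else if matchesRegion p westL then 3
  else 4

def split_europe_alt (ports : List String) (dn : String) (dc : String) : List String :=
  let best0 : Int :=
    if decide (2 ≤ ports.length) && matchesRegion (PySem.List.pyGetD ports 0 "") balticL then 1 else 4
  let best : Int := (PySem.List.slice ports (some 1) none).foldl (fun b p => min b (rankB p)) best0
  PySem.List.pyGetD [["Baltic", "E"], ["Eastern Med", "E"], ["Western Med", "E"], [dn, dc]] (best - 1) []

-- ===== PRECONDITION & SPEC =====
def Spec_split_europe (ports : List String) (dn : String) (dc : String) (out : List String) : Prop := out = split_europe_alt ports dn dc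
instance (ports : List String) (dn : String) (dc : String) (out : List String) : Decidable (Spec_split_europe ports dn dc out) := by unfold Spec_split_europe; infer_instance

-- ===== CLAIM (what is proved, stated in full; the proofs are below) =====
def Claim_equal_split_europe : Prop := ∀ (ports : List String) (dn : String) (dc : String), Dom_split_europe ports dn dc → Spec_split_europe ports dn dc (split_europe ports dn dc)

-- ===== LEMMAS AND PROOFS =====

lemma portsListA_eq (ports : List String) : portsListA ports = ports.drop 1 := by
  unfold portsListA
  rcases ports with _ | ⟨p0, pl⟩
  · rfl
  · rw [show PySem.List.len (p0 :: pl) = ((p0 :: pl).length : Int) from PySem.List.len_eq _,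
        PySem.List.pyRange_one_cons (by exact_mod_cast Nat.succ_pos pl.length)]
    simp only [List.foldl_cons, zero_add, show ((0 : Int) == 0) = true from rfl, if_true]
    have hcongr := PySem.List.foldl_congr_mem
          (PySem.List.pyRange 1 ((p0 :: pl).length : Int))
          (fun acc i => if i == 0 then acc else acc ++ [PySem.List.pyGetD (p0 :: pl) i ""])
          (fun acc x => acc ++ [PySem.List.pyGetD (p0 :: pl) x ""]) []
          (by
            intro acc i hi
            rw [PySem.List.mem_pyRange_one] at hi
            have : ¬ ((i == 0) = true) := by simp; omega
            simp only [if_neg this])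
    rw [hcongr,
        PySem.List.foldl_pyRange_pyGetD' (p0 :: pl) "" (fun acc x => acc ++ [x]) [] (by norm_num)]
    simpa using PySem.List.foldl_append_singleton ((p0 :: pl).drop 1) []

lemma innerBalticA_eq (first e : String) (pl : List String) :
    innerBalticA first e pl
      = (pl.any (fun p => PySem.Str.isIn p e || PySem.Str.isIn e p)
         || (!pl.isEmpty && (PySem.Str.isIn first e || PySem.Str.isIn e first))) := by
  induction pl with
  | nil => rfl
  | cons p rest ih =>
    rw [Bool.eq_iff_iff]
    simp only [innerBalticA, List.any_cons, ih, List.isEmpty_cons]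
    cases h1 : (PySem.Str.isIn p e || PySem.Str.isIn e p) <;>
      cases h2 : (PySem.Str.isIn first e || PySem.Str.isIn e first) <;>
        simp [h1, h2] <;> tauto

lemma innerSimpleA_eq (e : String) (pl : List String) :
    innerSimpleA e pl = pl.any (fun p => PySem.Str.isIn p e || PySem.Str.isIn e p) := by
  induction pl with
  | nil => rfl
  | cons p rest ih =>
    rw [Bool.eq_iff_iff]
    simp only [innerSimpleA, List.any_cons, ih]
    by_cases h : (PySem.Str.isIn p e || PySem.Str.isIn e p) = true <;> simp [h]

lemma outerBalticA_eq (first : String) (pl l : List String) :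
    outerBalticA first pl l = (l.any (fun e => innerBalticA first e pl)) := by
  induction l with
  | nil => rfl
  | cons e rest ih =>
    rw [Bool.eq_iff_iff]
    simp only [outerBalticA, List.any_cons, ih]
    by_cases h : innerBalticA first e pl = true <;> simp [h]

lemma outerSimpleA_eq (pl l : List String) :
    outerSimpleA pl l = l.any (fun e => innerSimpleA e pl) := by
  induction l with
  | nil => rfl
  | cons e rest ih =>
    rw [Bool.eq_iff_iff]
    simp only [outerSimpleA, List.any_cons, ih]
    by_cases h : innerSimpleA e pl = true <;> simp [h]

-- swap the two nested 'any's: region-major scan = port-major scan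
lemma any_swap {α β : Type} (l : List α) (m : List β) (f : α → β → Bool) :
    l.any (fun e => m.any (fun p => f e p)) = m.any (fun p => l.any (fun e => f e p)) := by
  rw [Bool.eq_iff_iff]
  simp only [List.any_eq_true]
  constructor
  · rintro ⟨e, he, p, hp, h⟩; exact ⟨p, hp, e, he, h⟩
  · rintro ⟨p, hp, e, he, h⟩; exact ⟨e, he, p, hp, h⟩

lemma rankB_le_four (p : String) : rankB p ≤ 4 := by
  unfold rankB; split_ifs <;> omega

lemma foldl_min_eq (pl : List String) (b : Int) (hb : b ≤ 4) :
    pl.foldl (fun b p => min b (rankB p)) b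
      = min b (pl.foldl (fun b p => min b (rankB p)) 4) := by
  induction pl generalizing b with
  | nil => simp; omega
  | cons p rest ih =>
    simp only [List.foldl_cons]
    rw [ih (min b (rankB p)) (by have := rankB_le_four p; omega),
        ih (min 4 (rankB p)) (by have := rankB_le_four p; omega),
        min_eq_right (rankB_le_four p), min_assoc]

lemma foldl_rank_eq (pl : List String) :
    pl.foldl (fun b p => min b (rankB p)) 4
      = (if pl.any (fun p => matchesRegion p balticL) then 1
         else if pl.any (fun p => matchesRegion p easternL) then 2
         else if pl.any (fun p => matchesRegion p westL) then 3 else 4) := by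
  induction pl with
  | nil => rfl
  | cons p rest ih =>
    simp only [List.foldl_cons, List.any_cons]
    rw [foldl_min_eq _ _ (by have := rankB_le_four p; omega), ih]
    unfold rankB
    by_cases hB : matchesRegion p balticL = true <;>
      by_cases hE : matchesRegion p easternL = true <;>
        by_cases hW : matchesRegion p westL = true <;>
          by_cases hB2 : rest.any (fun p => matchesRegion p balticL) = true <;>
            by_cases hE2 : rest.any (fun p => matchesRegion p easternL) = true <;>
              by_cases hW2 : rest.any (fun p => matchesRegion p westL) = true <;>
                simp only [hB, hE, hW, hB2, hE2, hW2] <;> simp [min_def]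

-- A's baltic condition, rearranged to B's port-major form
lemma balticA_eq (p0 : String) (pl : List String) :
    balticL.any (fun e =>
        (pl.any fun p => PySem.Str.isIn p e || PySem.Str.isIn e p)
        || (!pl.isEmpty && (PySem.Str.isIn p0 e || PySem.Str.isIn e p0)))
      = (pl.any (fun p => matchesRegion p balticL)
         || (!pl.isEmpty && matchesRegion p0 balticL)) := by
  rw [Bool.eq_iff_iff]
  simp only [List.any_eq_true, matchesRegion, Bool.or_eq_true, Bool.and_eq_true]
  constructor
  · rintro ⟨e, he, ⟨p, hp, h⟩ | ⟨hne, h⟩⟩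
    · exact Or.inl ⟨p, hp, e, he, h⟩
    · exact Or.inr ⟨hne, e, he, h⟩
  · rintro (⟨p, hp, e, he, h⟩ | ⟨hne, e, he, h⟩)
    · exact ⟨e, he, Or.inl ⟨p, hp, h⟩⟩
    · exact ⟨e, he, Or.inr ⟨hne, h⟩⟩

-- ===== VERDICT (by name: the statement is the Claim_ definition above) =====
theorem split_europe_spec : Claim_equal_split_europe := by
  intro ports dn dc _
  unfold Spec_split_europe split_europe split_europe_alt
  rw [portsListA_eq, PySem.List.slice_from _ (by norm_num)]
  rcases ports with _ | ⟨p0, pl⟩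
  · rfl
  · simp only [List.drop_one, List.tail_cons, Int.toNat_one]
    rw [outerBalticA_eq, foldl_min_eq _ _ (by split_ifs <;> omega), foldl_rank_eq]
    simp only [innerBalticA_eq]
    rw [show PySem.List.pyGetD (p0 :: pl) 0 "" = p0 from by
          simp [PySem.List.pyGetD, PySem.List.pyGet?, PySem.List.pyIdx?], balticA_eq,
        outerSimpleA_eq, outerSimpleA_eq]
    simp only [innerSimpleA_eq]
    have hlen : decide (2 ≤ (p0 :: pl).length) = !pl.isEmpty := by cases pl <;> simp
    rw [any_swap easternL pl, any_swap westL pl, hlen]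
    simp only [show (fun p => easternL.any fun e => PySem.Str.isIn p e || PySem.Str.isIn e p)
          = (fun p => matchesRegion p easternL) from rfl,
        show (fun p => westL.any fun e => PySem.Str.isIn p e || PySem.Str.isIn e p)
          = (fun p => matchesRegion p westL) from rfl]
    generalize (!pl.isEmpty && matchesRegion p0 balticL) = b0
    generalize (pl.any fun p => matchesRegion p balticL) = bb
    generalize (pl.any fun p => matchesRegion p easternL) = be
    generalize (pl.any fun p => matchesRegion p westL) = bw
    cases b0 <;> cases bb <;> cases be <;> cases bw <;>
      simp [PySem.List.pyGetD, PySem.List.pyGet?, PySem.List.pyIdx?]
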